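-- pv_equiv track=rewrite | github.com/huangxiaohui1991/trade | scripts/state/service.py | _apply_existing_alert_state
-- ===== SOURCE A (Python) =====
-- def _apply_existing_alert_state(alerts: list[dict], previous_alerts: list[dict]) -> list[dict]:
--     previous_by_key = {
--         str(item.get("alert_key", "")).strip(): item
--         for item in previous_alerts or []
--         if str(item.get("alert_key", "")).strip()
--     }
--     for alert in alerts:
--         previous = previous_by_key.get(str(alert.get("alert_key", "")).strip())
--         if not previous:
--             continue
--         alert["acknowledged"] = bool(previous.get("acknowledged", False))
--         alert["acknowledged_at"] = str(previous.get("acknowledged_at", ""))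
--         alert["acknowledged_by"] = str(previous.get("acknowledged_by", ""))
--         alert["handling_status"] = str(previous.get("handling_status", "pending")) or "pending"
--     return alerts
-- ===== SOURCE B (Python) =====
-- def _apply_existing_alert_state(alerts: list[dict], previous_alerts: list[dict]) -> list[dict]:
--     for item in previous_alerts or []:
--         key = str(item.get("alert_key", "")).strip()
--         if not key:
--             continue
--         for alert in alerts:
--             if str(alert.get("alert_key", "")).strip() != key:
--                 continue
--             alert["acknowledged"] = bool(item.get("acknowledged", False))
--             alert["acknowledged_at"] = str(item.get("acknowledged_at", ""))
--             alert["acknowledged_by"] = str(item.get("acknowledged_by", ""))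
--             alert["handling_status"] = str(item.get("handling_status", "pending")) or "pending"
--     return alerts
-- ===== Notes on version B (the rewrite author's own statement) =====
-- stated objective: alternative
-- what changed: Transposes the loops: instead of indexing previous_alerts by stripped key and looking each alert up, B iterates previous alerts outermost and pushes each nonempty-keyed item's state onto every matching alert, later previous items overwriting earlier ones so the dict's last-wins duplicate semantics emerges from traversal order.
import Mathlib
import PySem

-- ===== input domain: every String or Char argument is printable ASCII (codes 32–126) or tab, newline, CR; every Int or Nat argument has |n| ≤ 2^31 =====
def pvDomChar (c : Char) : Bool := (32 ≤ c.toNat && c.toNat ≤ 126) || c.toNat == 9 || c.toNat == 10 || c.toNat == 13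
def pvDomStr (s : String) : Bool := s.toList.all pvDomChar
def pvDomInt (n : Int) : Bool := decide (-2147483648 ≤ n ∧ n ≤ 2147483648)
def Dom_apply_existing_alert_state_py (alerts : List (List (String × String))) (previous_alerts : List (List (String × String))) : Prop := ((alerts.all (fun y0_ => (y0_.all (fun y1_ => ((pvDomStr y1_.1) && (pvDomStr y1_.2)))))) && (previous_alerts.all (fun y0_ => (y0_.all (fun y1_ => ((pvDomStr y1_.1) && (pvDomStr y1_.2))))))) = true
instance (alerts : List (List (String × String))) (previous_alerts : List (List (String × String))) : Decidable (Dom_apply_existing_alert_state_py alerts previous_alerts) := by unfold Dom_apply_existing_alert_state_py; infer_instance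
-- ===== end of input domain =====

-- B transposes the traversal: instead of A's key-indexed dict over previous_alerts plus one
-- lookup per alert, B iterates previous alerts outermost and pushes each nonempty-keyed item's
-- state onto every matching alert, later items overwriting earlier ones (same last-wins result).
-- A and B (in Python) mutate the alert dicts of `alerts` in place identically; the equivalence
-- proved here is about the returned value.

-- ===== PORT A =====
-- str(item.get("alert_key", "")).strip() — shared by both Pythons verbatim
def pvAlertKey (item : List (String × String)) : String :=
  PySem.Str.strip (PySem.Dict.getD (PySem.Dict.ofList item) "alert_key" "")

-- the four field assignments (identical lines in both Pythons); Python's bool is rendered "True"/"False"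
def pvCopyState (previous : PySem.Dict String String) (a : PySem.Dict String String) : List (String × String) :=
  (((((a.insert "acknowledged"
        (match previous.get? "acknowledged" with    -- bool(previous.get("acknowledged", False))
         | none => "False"
         | some s => if s = "" then "False" else "True")).insert
      "acknowledged_at" (previous.getD "acknowledged_at" "")).insert
      "acknowledged_by" (previous.getD "acknowledged_by" "")).insert
      "handling_status"
        (if previous.getD "handling_status" "pending" = "" then "pending"
         else previous.getD "handling_status" "pending"))).items

def apply_existing_alert_state_py (alerts : List (List (String × String))) (previous_alerts : List (List (String × String))) : List (List (String × String)) :=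
  let previous_by_key : PySem.Dict String (PySem.Dict String String) :=
    previous_alerts.foldl
      (fun d item =>
        if pvAlertKey item ≠ "" then d.insert (pvAlertKey item) (PySem.Dict.ofList item) else d)
      PySem.Dict.empty
  alerts.map (fun alert =>
    match previous_by_key.get? (pvAlertKey alert) with
    | none => alert                                         -- if not previous: continue
    | some previous =>
      if previous.items.isEmpty then alert                  -- `not previous` on an empty dict
      else pvCopyState previous (PySem.Dict.ofList alert))

-- ===== PORT B =====
-- outer loop over previous_alerts; the loop state is the whole alerts list,
-- each nonempty-keyed item overwriting the state of every matching alert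
def apply_existing_alert_state_py_alt (alerts : List (List (String × String))) (previous_alerts : List (List (String × String))) : List (List (String × String)) :=
  previous_alerts.foldl
    (fun als item =>
      let key := pvAlertKey item
      if key = "" then als                                  -- if not key: continue
      else als.map (fun alert =>
        if pvAlertKey alert ≠ key then alert                -- continue
        else pvCopyState (PySem.Dict.ofList item) (PySem.Dict.ofList alert)))
    alerts

-- ===== PRECONDITION & SPEC =====
def Spec_apply_existing_alert_state_py (alerts : List (List (String × String))) (previous_alerts : List (List (String × String))) (out : List (List (String × String))) : Prop := out = apply_existing_alert_state_py_alt alerts previous_alerts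
instance (alerts : List (List (String × String))) (previous_alerts : List (List (String × String))) (out : List (List (String × String))) : Decidable (Spec_apply_existing_alert_state_py alerts previous_alerts out) := by unfold Spec_apply_existing_alert_state_py; infer_instance

-- ===== CLAIM (what is proved, stated in full; the proofs are below) =====
def Claim_equal_apply_existing_alert_state_py : Prop := ∀ (alerts : List (List (String × String))) (previous_alerts : List (List (String × String))), Dom_apply_existing_alert_state_py alerts previous_alerts → Spec_apply_existing_alert_state_py alerts previous_alerts (apply_existing_alert_state_py alerts previous_alerts)

-- ===== LEMMAS AND PROOFS =====

-- the last item of `prev` whose stripped alert_key is k (the semantics both programs realise)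
def pvLastScan (prev : List (List (String × String))) (k : String) : Option (List (String × String)) :=
  prev.foldl (fun acc item => if pvAlertKey item = k then some item else acc) none

-- what both programs do to one alert, given the whole previous list
def pvApply (prev : List (List (String × String))) (alert : List (String × String)) : List (String × String) :=
  if pvAlertKey alert = "" then alert
  else match pvLastScan prev (pvAlertKey alert) with
    | none => alert
    | some it => pvCopyState (PySem.Dict.ofList it) (PySem.Dict.ofList alert)

-- a dict with Nodup keys is recovered from its items list
theorem pv_ofList_items (d : PySem.Dict String String) (h : d.keys.Nodup) :
    PySem.Dict.ofList d.items = d := by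
  apply PySem.Dict.ext
  show (PySem.Dict.empty.update d.items).items = d.items
  rw [PySem.Dict.update,
      PySem.Dict.items_foldl_insert_fresh d.items Prod.fst Prod.snd PySem.Dict.empty
        (fun a _ => PySem.Dict.contains_empty a.1) h]
  simp [PySem.Dict.empty]

-- an insert at an already-present key commutes with any later insert at another key
theorem pv_insert_comm (d : PySem.Dict String String) (k k' v w : String)
    (hne : k ≠ k') (hc : d.contains k = true) :
    (d.insert k' w).insert k v = (d.insert k v).insert k' w := by
  apply PySem.Dict.ext
  by_cases hc' : d.contains k' = true
  · rw [PySem.Dict.items_insert_of_contains _ v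
          (by rw [PySem.Dict.contains_insert]; simp [hc]),
        PySem.Dict.items_insert_of_contains _ w hc',
        PySem.Dict.items_insert_of_contains _ w
          (by rw [PySem.Dict.contains_insert]; simp [hc']),
        PySem.Dict.items_insert_of_contains _ v hc]
    simp only [List.map_map]
    refine List.map_congr_left ?_
    intro p _
    by_cases h1 : p.1 = k <;> by_cases h2 : p.1 = k' <;>
      simp [Function.comp, h1, h2, hne, Ne.symm hne]
  · have hcf : d.contains k' = false := by revert hc'; cases d.contains k' <;> simp
    rw [PySem.Dict.items_insert_of_contains _ v
          (by rw [PySem.Dict.contains_insert]; simp [hc]),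
        PySem.Dict.items_insert_of_not_contains _ w hcf,
        PySem.Dict.items_insert_of_not_contains _ w
          (by rw [PySem.Dict.contains_insert]; simp [hcf, Ne.symm hne]),
        PySem.Dict.items_insert_of_contains _ v hc]
    simp [Ne.symm hne]

-- overwriting the four state fields twice is the same as writing the last values once
theorem pv_insert4_collapse (a : PySem.Dict String String) (x y z w x' y' z' w' : String) :
    (((((((a.insert "acknowledged" x).insert "acknowledged_at" y).insert "acknowledged_by" z).insert
          "handling_status" w).insert "acknowledged" x').insert "acknowledged_at" y').insert
          "acknowledged_by" z').insert "handling_status" w'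
    = (((a.insert "acknowledged" x').insert "acknowledged_at" y').insert "acknowledged_by" z').insert
          "handling_status" w' := by
  have c1 : ∀ d : PySem.Dict String String, ∀ v, (d.insert "acknowledged" v).contains "acknowledged" = true :=
    fun d v => PySem.Dict.contains_insert_self d _ v
  have c1' : ∀ d : PySem.Dict String String, ∀ v w, ((d.insert "acknowledged" v).insert "acknowledged_at" w).contains "acknowledged" = true := by
    intro d v w; rw [PySem.Dict.contains_insert]; simp [c1]
  have c1'' : ∀ d : PySem.Dict String String, ∀ v w u, (((d.insert "acknowledged" v).insert "acknowledged_at" w).insert "acknowledged_by" u).contains "acknowledged" = true := by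
    intro d v w u; rw [PySem.Dict.contains_insert]; simp [c1']
  have c2 : ∀ d : PySem.Dict String String, ∀ v, (d.insert "acknowledged_at" v).contains "acknowledged_at" = true :=
    fun d v => PySem.Dict.contains_insert_self d _ v
  have c2' : ∀ d : PySem.Dict String String, ∀ v w, ((d.insert "acknowledged_at" v).insert "acknowledged_by" w).contains "acknowledged_at" = true := by
    intro d v w; rw [PySem.Dict.contains_insert]; simp [c2]
  rw [pv_insert_comm _ "acknowledged" "handling_status" x' w (by decide) (c1'' _ _ _ _),
      pv_insert_comm _ "acknowledged" "acknowledged_by" x' z (by decide) (c1' _ _ _),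
      pv_insert_comm _ "acknowledged" "acknowledged_at" x' y (by decide) (c1 _ _),
      PySem.Dict.insert_insert_self,
      pv_insert_comm _ "acknowledged_at" "handling_status" y' w (by decide) (c2' _ _ _),
      pv_insert_comm _ "acknowledged_at" "acknowledged_by" y' z (by decide) (c2 _ _),
      PySem.Dict.insert_insert_self,
      pv_insert_comm _ "acknowledged_by" "handling_status" z' w (by decide)
        (PySem.Dict.contains_insert_self _ _ _),
      PySem.Dict.insert_insert_self,
      PySem.Dict.insert_insert_self]

-- the four inserts keep keys Nodup
theorem pv_nodup4 (a : PySem.Dict String String) (h : a.keys.Nodup) (x y z w : String) :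
    ((((a.insert "acknowledged" x).insert "acknowledged_at" y).insert "acknowledged_by" z).insert
      "handling_status" w).keys.Nodup :=
  PySem.Dict.nodup_keys_insert _ _ _ (PySem.Dict.nodup_keys_insert _ _ _
    (PySem.Dict.nodup_keys_insert _ _ _ (PySem.Dict.nodup_keys_insert _ _ _ h)))

-- the copied-state record still carries the alert's original stripped key
theorem pv_key_copyState (P : PySem.Dict String String) (alert : List (String × String)) :
    pvAlertKey (pvCopyState P (PySem.Dict.ofList alert)) = pvAlertKey alert := by
  unfold pvCopyState pvAlertKey
  rw [pv_ofList_items _ (pv_nodup4 _ (PySem.Dict.nodup_keys_ofList alert) _ _ _ _)]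
  rw [PySem.Dict.getD_insert, PySem.Dict.getD_insert, PySem.Dict.getD_insert, PySem.Dict.getD_insert]
  simp

-- applying a later matching item on top of an earlier one collapses to the later one alone
theorem pv_copyState_collapse (P Q : PySem.Dict String String) (alert : List (String × String)) :
    pvCopyState P (PySem.Dict.ofList (pvCopyState Q (PySem.Dict.ofList alert)))
    = pvCopyState P (PySem.Dict.ofList alert) := by
  unfold pvCopyState
  rw [pv_ofList_items _ (pv_nodup4 _ (PySem.Dict.nodup_keys_ofList alert) _ _ _ _)]
  exact congrArg PySem.Dict.items (pv_insert4_collapse _ _ _ _ _ _ _ _ _)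

-- a matched item's record is a nonempty dict (its stripped alert_key is k ≠ "")
theorem pv_match_nonempty (p : PySem.Dict String String)
    (h : PySem.Str.strip (p.getD "alert_key" "") ≠ "") : p.items.isEmpty = false := by
  obtain ⟨its⟩ := p
  cases its with
  | nil =>
    exfalso
    apply h
    have : (PySem.Dict.mk ([] : List (String × String))) = PySem.Dict.empty := rfl
    rw [this, PySem.Dict.getD_empty]
    decide
  | cons x xs => rfl

-- inserting only nonempty keys never touches the "" slot of A's index
theorem pv_get_empty_key (l : List (List (String × String))) :
    ∀ d : PySem.Dict String (PySem.Dict String String),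
      (l.foldl (fun d item =>
          if pvAlertKey item ≠ "" then d.insert (pvAlertKey item) (PySem.Dict.ofList item) else d)
        d).get? "" = d.get? "" := by
  induction l with
  | nil => intro d; rfl
  | cons it l ih =>
    intro d
    simp only [List.foldl_cons]
    rw [ih]
    by_cases h : pvAlertKey it = ""
    · rw [if_neg (fun hh => hh h)]
    · rw [if_pos h, PySem.Dict.get?_insert, if_neg (fun hc => h hc.symm)]

-- A's index lookup at a nonempty key is the last-match scan of previous_alerts
theorem pv_get_eq_scan (k : String) (hk : k ≠ "") (l : List (List (String × String))) :
    ∀ (d : PySem.Dict String (PySem.Dict String String)) (acc : Option (List (String × String))),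
      d.get? k = acc.map PySem.Dict.ofList →
      (l.foldl (fun d item =>
          if pvAlertKey item ≠ "" then d.insert (pvAlertKey item) (PySem.Dict.ofList item) else d)
        d).get? k
      = (l.foldl (fun acc item => if pvAlertKey item = k then some item else acc) acc).map
          PySem.Dict.ofList := by
  induction l with
  | nil => intro d acc h; exact h
  | cons it l ih =>
    intro d acc h
    simp only [List.foldl_cons]
    apply ih
    by_cases hit : pvAlertKey it = ""
    · have hne : ¬ pvAlertKey it = k := fun hc => hk (hc ▸ hit)
      rw [if_neg (fun hh => hh hit), if_neg hne, h]
    · rw [if_pos hit, PySem.Dict.get?_insert]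
      by_cases hek : pvAlertKey it = k
      · rw [if_pos hek.symm, if_pos hek]; rfl
      · rw [if_neg (fun hc => hek hc.symm), if_neg hek, h]

-- any item the scan returns carries the key it was matched on
theorem pv_scan_some (k : String) (l : List (List (String × String))) :
    ∀ acc : Option (List (String × String)),
      (∀ p, acc = some p → pvAlertKey p = k) →
      ∀ p, l.foldl (fun acc item => if pvAlertKey item = k then some item else acc) acc = some p →
        pvAlertKey p = k := by
  induction l with
  | nil => intro acc hacc p hp; exact hacc p hp
  | cons it l ih =>
    intro acc hacc p hp
    refine ih _ ?_ p hp
    intro q hq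
    by_cases h : pvAlertKey it = k
    · simp only [if_pos h] at hq
      cases hq
      exact h
    · simp only [if_neg h] at hq
      exact hacc q hq

-- one step of B's outer loop on top of the already-applied prefix = applying the extended prefix
theorem pv_apply_append (l : List (List (String × String))) (it alert : List (String × String))
    (hit : ¬ pvAlertKey it = "") :
    (if pvAlertKey (pvApply l alert) ≠ pvAlertKey it then pvApply l alert
     else pvCopyState (PySem.Dict.ofList it) (PySem.Dict.ofList (pvApply l alert)))
    = pvApply (l ++ [it]) alert := by
  by_cases hk : pvAlertKey alert = ""
  · have ha : pvApply l alert = alert := by unfold pvApply; rw [if_pos hk]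
    rw [ha, if_pos (show ¬ pvAlertKey alert = pvAlertKey it from fun hc => hit (hc.symm.trans hk))]
    unfold pvApply; rw [if_pos hk]
  · have hscan' : pvLastScan (l ++ [it]) (pvAlertKey alert)
        = if pvAlertKey it = pvAlertKey alert then some it
          else pvLastScan l (pvAlertKey alert) := by
      unfold pvLastScan
      rw [List.foldl_append, List.foldl_cons, List.foldl_nil]
    cases hscan : pvLastScan l (pvAlertKey alert) with
    | none =>
      have ha : pvApply l alert = alert := by unfold pvApply; rw [if_neg hk, hscan]
      rw [ha]
      by_cases heq : pvAlertKey it = pvAlertKey alert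
      · rw [if_neg (show ¬ pvAlertKey alert ≠ pvAlertKey it from fun h => h heq.symm)]
        unfold pvApply; rw [if_neg hk, hscan', if_pos heq]
      · rw [if_pos (show pvAlertKey alert ≠ pvAlertKey it from fun hc => heq hc.symm)]
        unfold pvApply; rw [if_neg hk, hscan', if_neg heq, hscan]
    | some p =>
      have ha : pvApply l alert = pvCopyState (PySem.Dict.ofList p) (PySem.Dict.ofList alert) := by
        unfold pvApply; rw [if_neg hk, hscan]
      rw [ha, pv_key_copyState]
      by_cases heq : pvAlertKey it = pvAlertKey alert
      · rw [if_neg (show ¬ pvAlertKey alert ≠ pvAlertKey it from fun h => h heq.symm),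
            pv_copyState_collapse]
        unfold pvApply; rw [if_neg hk, hscan', if_pos heq]
      · rw [if_pos (show pvAlertKey alert ≠ pvAlertKey it from fun hc => heq hc.symm)]
        unfold pvApply; rw [if_neg hk, hscan', if_neg heq, hscan]

-- B's transposed fold computes pvApply pointwise
theorem pv_alt_eq_map (prev : List (List (String × String))) (alerts : List (List (String × String))) :
    apply_existing_alert_state_py_alt alerts prev = alerts.map (pvApply prev) := by
  unfold apply_existing_alert_state_py_alt
  induction prev using List.reverseRecOn with
  | nil =>
    simp only [List.foldl_nil]
    have h : ∀ a ∈ alerts, pvApply [] a = a := by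
      intro a _
      unfold pvApply pvLastScan
      by_cases hk : pvAlertKey a = ""
      · rw [if_pos hk]
      · rw [if_neg hk, List.foldl_nil]
    rw [List.map_congr_left h, List.map_id']
  | append_singleton l it ih =>
    rw [List.foldl_append, List.foldl_cons, List.foldl_nil, ih]
    by_cases hit : pvAlertKey it = ""
    · rw [if_pos hit]
      refine List.map_congr_left ?_
      intro alert _
      unfold pvApply pvLastScan
      by_cases hk : pvAlertKey alert = ""
      · rw [if_pos hk, if_pos hk]
      · rw [if_neg hk, if_neg hk, List.foldl_append, List.foldl_cons, List.foldl_nil,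
            if_neg (show ¬ pvAlertKey it = pvAlertKey alert from fun hc => hk (hc.symm.trans hit))]
    · rw [if_neg hit, List.map_map]
      refine List.map_congr_left ?_
      intro alert _
      simp only [Function.comp_apply]
      exact pv_apply_append l it alert hit

-- ===== VERDICT (by name: the statement is the Claim_ definition above) =====
theorem apply_existing_alert_state_py_spec : Claim_equal_apply_existing_alert_state_py := by
  intro alerts previous_alerts _
  unfold Spec_apply_existing_alert_state_py
  rw [pv_alt_eq_map]
  unfold apply_existing_alert_state_py
  refine List.map_congr_left ?_
  intro alert _
  unfold pvApply pvLastScan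
  by_cases hk : pvAlertKey alert = ""
  · rw [hk, pv_get_empty_key previous_alerts PySem.Dict.empty, PySem.Dict.get?_empty]
    simp
  · rw [pv_get_eq_scan (pvAlertKey alert) hk previous_alerts PySem.Dict.empty none
        (by rw [PySem.Dict.get?_empty]; rfl)]
    rw [if_neg hk]
    cases hscan : previous_alerts.foldl
        (fun acc item => if pvAlertKey item = pvAlertKey alert then some item else acc) none with
    | none => rfl
    | some p =>
      have hkey := pv_scan_some (pvAlertKey alert) previous_alerts none (by intro q hq; cases hq) p hscan
      have hne := pv_match_nonempty (PySem.Dict.ofList p) (by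
        show PySem.Str.strip ((PySem.Dict.ofList p).getD "alert_key" "") ≠ ""
        exact fun hc => hk (hkey ▸ hc))
      simp [hne]
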